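-- pv_equiv track=rewrite | github.com/kylekim2123/Algorithm-with-Python | SSAFY/0216/어디에단어가들어갈수있을까.py | find_possible_space
-- ===== SOURCE A (Python) =====
-- def find_possible_space(arr, arr_size, word_len):
--     possible_space = 0
--     for line in arr: # 한 줄씩
--         wall = [-1] + [i for i in range(arr_size) if line[i] == '0'] + [arr_size]
--         for i in range(1, len(wall)):
--             space = wall[i] - (wall[i-1]+1) # 빈 공간 = 채워진 칸 끼리의 사이 거리
--             if space == word_len:
--                 possible_space += 1
--     return possible_space
-- ===== SOURCE B (Python) =====
-- def find_possible_space(arr, arr_size, word_len):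
--     possible_space = 0
--     for line in arr:
--         run = 0
--         for i in range(arr_size):
--             if line[i] == '0':
--                 if run == word_len:
--                     possible_space += 1
--                 run = 0
--             else:
--                 run += 1
--         if run == word_len:
--             possible_space += 1
--     return possible_space
-- ===== Notes on version B (the rewrite author's own statement) =====
-- stated objective: simpler
-- what changed: Replaces building the per-line wall-index list and diffing adjacent walls with a single-pass run-length accumulator per line (compare run to word_len at each wall and once after the loop).
-- intended difference: On nonempty arr with negative arr_size and word_len equal to 0 or to arr_size, A counts one phantom gap of negative length arr_size per line (returning len(arr) when word_len==arr_size, 0 when word_len==0) while B sees one empty run per line (returning 0 resp. len(arr)); B's value is intended since a negative-length word fits nowhere and a zero-width row holds exactly one empty slot. — e.g. on find_possible_space(["x"], -1, 0): A returns 0, B returns 1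
import Mathlib
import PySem

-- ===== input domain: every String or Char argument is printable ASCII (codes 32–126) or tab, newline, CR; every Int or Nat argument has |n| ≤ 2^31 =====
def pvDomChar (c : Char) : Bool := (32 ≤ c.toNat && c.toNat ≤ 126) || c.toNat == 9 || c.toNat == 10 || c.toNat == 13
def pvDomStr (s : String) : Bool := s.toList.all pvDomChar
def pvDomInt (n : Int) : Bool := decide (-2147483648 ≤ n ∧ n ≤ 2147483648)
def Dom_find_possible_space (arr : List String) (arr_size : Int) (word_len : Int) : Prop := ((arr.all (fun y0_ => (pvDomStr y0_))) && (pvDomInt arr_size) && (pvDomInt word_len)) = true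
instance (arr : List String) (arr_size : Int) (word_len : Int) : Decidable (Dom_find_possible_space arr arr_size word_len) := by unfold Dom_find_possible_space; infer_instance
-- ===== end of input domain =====

-- B replaces A's per-line wall-index list and adjacent-diff loop with a single-pass
-- run-length accumulator (objective: simpler, same asymptotic cost).

-- ===== PORT A =====
-- line[i] raises IndexError when i is out of range; Pre_ guarantees i < len(line),
-- so the .getD ' ' default is never consulted on admitted inputs (likewise the
-- wall-list pyGetD default, whose indices are always in range).
def find_possible_space (arr : List String) (arr_size : Int) (word_len : Int) : Int :=
  arr.foldl (fun possible_space line =>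
    let wall : List Int :=
      [-1] ++ ((PySem.List.pyRange 0 arr_size 1).filter
                 (fun i => ((PySem.Str.pyGet? line i).getD ' ') = '0')) ++ [arr_size]
    (PySem.List.pyRange 1 (wall.length : Int) 1).foldl (fun possible_space i =>
      let space := PySem.List.pyGetD wall i 0 - (PySem.List.pyGetD wall (i - 1) 0 + 1)
      if space = word_len then possible_space + 1 else possible_space) possible_space) 0

-- ===== PORT B =====
def find_possible_space_alt (arr : List String) (arr_size : Int) (word_len : Int) : Int :=
  arr.foldl (fun possible_space line =>
    let st : Int × Int :=
      (PySem.List.pyRange 0 arr_size 1).foldl (fun (st : Int × Int) i =>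
        if ((PySem.Str.pyGet? line i).getD ' ') = '0' then
          (if st.2 = word_len then st.1 + 1 else st.1, 0)
        else
          (st.1, st.2 + 1)) (possible_space, 0)
    if st.2 = word_len then st.1 + 1 else st.1) 0

-- ===== PRECONDITION & SPEC =====
-- Pre_ excludes exactly the inputs on which Python A raises IndexError: a line shorter
-- than arr_size (vacuous for arr_size <= 0, where nothing is indexed).
def Pre_find_possible_space (arr : List String) (arr_size : Int) (word_len : Int) : Prop :=
  ∀ line ∈ arr, arr_size ≤ PySem.Str.len line
instance (arr : List String) (arr_size : Int) (word_len : Int) : Decidable (Pre_find_possible_space arr arr_size word_len) := by unfold Pre_find_possible_space; infer_instance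

def pvWitness_find_possible_space : List String × Int × Int := (["a0 0", "0000"], 4, 1)

-- On nonempty arr with negative arr_size and word_len equal to 0 or to arr_size, A counts a
-- phantom gap of negative length arr_size in each line (so it returns len(arr) when
-- word_len = arr_size and 0 when word_len = 0), while B sees one empty run per line (returning
-- 0 resp. len(arr)); B's value is the intended one: a word of negative length fits nowhere,
-- and scanning a zero-width row leaves exactly one empty slot, which fits word_len = 0.
def D_find_possible_space (arr : List String) (arr_size : Int) (word_len : Int) : Prop :=
  arr ≠ [] ∧ arr_size < 0 ∧ (word_len = 0 ∨ word_len = arr_size)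
instance (arr : List String) (arr_size : Int) (word_len : Int) : Decidable (D_find_possible_space arr arr_size word_len) := by unfold D_find_possible_space; infer_instance

def pvDiffWitness_find_possible_space : List String × Int × Int := (["x"], -1, 0)
def pvDiffWitnessOut_find_possible_space : Int × Int := (0, 1)

def Spec_find_possible_space (arr : List String) (arr_size : Int) (word_len : Int) (out : Int) : Prop := ¬ D_find_possible_space arr arr_size word_len → out = find_possible_space_alt arr arr_size word_len
instance (arr : List String) (arr_size : Int) (word_len : Int) (out : Int) : Decidable (Spec_find_possible_space arr arr_size word_len out) := by unfold Spec_find_possible_space; infer_instance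

-- ===== CLAIM (what is proved, stated in full; the proofs are below) =====
def Claim_unchanged_find_possible_space : Prop := ∀ (arr : List String) (arr_size : Int) (word_len : Int), Dom_find_possible_space arr arr_size word_len → Pre_find_possible_space arr arr_size word_len → Spec_find_possible_space arr arr_size word_len (find_possible_space arr arr_size word_len)
def Claim_changed_find_possible_space : Prop := Dom_find_possible_space (pvDiffWitness_find_possible_space.1) (pvDiffWitness_find_possible_space.2.1) (pvDiffWitness_find_possible_space.2.2) ∧ Pre_find_possible_space (pvDiffWitness_find_possible_space.1) (pvDiffWitness_find_possible_space.2.1) (pvDiffWitness_find_possible_space.2.2) ∧ D_find_possible_space (pvDiffWitness_find_possible_space.1) (pvDiffWitness_find_possible_space.2.1) (pvDiffWitness_find_possible_space.2.2) ∧ find_possible_space (pvDiffWitness_find_possible_space.1) (pvDiffWitness_find_possible_space.2.1) (pvDiffWitness_find_possible_space.2.2) = pvDiffWitnessOut_find_possible_space.1 ∧ find_possible_space_alt (pvDiffWitness_find_possible_space.1) (pvDiffWitness_find_possible_space.2.1) (pvDiffWitness_find_possible_space.2.2) = pvDiffWitnessOut_find_possible_space.2 ∧ pvDiffWitnessOut_find_possible_space.1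 ≠ pvDiffWitnessOut_find_possible_space.2
def Claim_exact_find_possible_space : Prop := ∀ (arr : List String) (arr_size : Int) (word_len : Int), Dom_find_possible_space arr arr_size word_len → Pre_find_possible_space arr arr_size word_len → D_find_possible_space arr arr_size word_len → find_possible_space arr arr_size word_len ≠ find_possible_space_alt arr arr_size word_len

-- ===== LEMMAS AND PROOFS =====

-- Consecutive integer block [s, s+1, …, s+n-1], the spine both per-line loops walk.
def pvL (n : Nat) (s : Int) : List Int :=
  match n with
  | 0 => []
  | n + 1 => s :: pvL n (s + 1)

-- A's inner adjacent-diff loop, restructured on the wall list (prev wall p, remaining walls l).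
def pvAPairs (w : Int) (p : Int) (l : List Int) (acc : Int) : Int :=
  match l with
  | [] => acc
  | x :: xs => pvAPairs w x xs (if x - (p + 1) = w then acc + 1 else acc)

lemma pvL_pyRange : ∀ (n : Nat) (s : Int), PySem.List.pyRange s (s + n) 1 = pvL n s := by
  intro n
  induction n with
  | zero => intro s; simp [pvL, PySem.List.pyRange_one_eq_nil]
  | succ n ih =>
    intro s
    rw [PySem.List.pyRange_one_cons (by omega)]
    have : s + 1 + (n : Int) = s + ((n : Nat) + 1 : Nat) := by push_cast; ring
    rw [← this, ih]
    rfl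

-- A's indexed inner loop over wall = p :: l, re-indexed to a Nat-range fold.
lemma pvInnerA_nat (w : Int) : ∀ (l : List Int) (p acc : Int),
    (List.range l.length).foldl (fun acc (k : Nat) =>
      if PySem.List.pyGetD (p :: l) (1 + (k : Int)) 0
         - (PySem.List.pyGetD (p :: l) ((1 + (k : Int)) - 1) 0 + 1) = w
      then acc + 1 else acc) acc = pvAPairs w p l acc := by
  intro l
  induction l with
  | nil => intro p acc; simp [pvAPairs]
  | cons x xs ih =>
    intro p acc
    rw [List.length_cons, List.range_succ_eq_map, List.foldl_cons, List.foldl_map]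
    have h0 : PySem.List.pyGetD (p :: x :: xs) (1 + ((0 : Nat) : Int)) 0 = x := by
      norm_num [PySem.List.pyGetD_ofNat']
    have h1 : PySem.List.pyGetD (p :: x :: xs) ((1 + ((0 : Nat) : Int)) - 1) 0 = p := by
      norm_num [PySem.List.pyGetD_zero_cons]
    rw [h0, h1]
    have hfun : (fun (acc : Int) (k : Nat) =>
        if PySem.List.pyGetD (p :: x :: xs) (1 + ((k.succ : Nat) : Int)) 0
           - (PySem.List.pyGetD (p :: x :: xs) ((1 + ((k.succ : Nat) : Int)) - 1) 0 + 1) = w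
        then acc + 1 else acc)
        = (fun (acc : Int) (k : Nat) =>
        if PySem.List.pyGetD (x :: xs) (1 + (k : Int)) 0
           - (PySem.List.pyGetD (x :: xs) ((1 + (k : Int)) - 1) 0 + 1) = w
        then acc + 1 else acc) := by
      funext acc k
      have e1 : (1 : Int) + ((k.succ : Nat) : Int) = ((k + 2 : Nat) : Int) := by push_cast; ring
      have e2 : ((k + 2 : Nat) : Int) - 1 = ((k + 1 : Nat) : Int) := by push_cast; ring
      have e3 : (1 : Int) + ((k : Nat) : Int) = ((k + 1 : Nat) : Int) := by push_cast; ring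
      have e4 : ((k + 1 : Nat) : Int) - 1 = ((k : Nat) : Int) := by push_cast; ring
      rw [e1, e2, e3, e4]
      simp only [PySem.List.pyGetD_natCast]
      simp [List.getD]
    rw [hfun, ih x]
    rfl

-- Core: per-line, A's wall-gap count equals B's run-length scan.
lemma pvKey (w : Int) (pred : Int → Bool) : ∀ (n : Nat) (s p acc : Int),
    pvAPairs w p ((pvL n s).filter pred ++ [s + n]) acc
    = (fun st : Int × Int => if st.2 = w then st.1 + 1 else st.1)
        ((pvL n s).foldl (fun (st : Int × Int) i =>
          if pred i then (if st.2 = w then st.1 + 1 else st.1, 0) else (st.1, st.2 + 1))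
          (acc, s - (p + 1))) := by
  intro n
  induction n with
  | zero => intro s p acc; simp [pvL, pvAPairs]
  | succ n ih =>
    intro s p acc
    have hend : s + ((n + 1 : Nat) : Int) = (s + 1) + (n : Int) := by push_cast; ring
    by_cases h : pred s = true
    · simp only [pvL, List.filter_cons, h, if_pos, List.cons_append, pvAPairs, List.foldl_cons,
        hend]
      rw [ih (s + 1) s]
      simp
    · simp only [pvL, List.filter_cons, h, List.foldl_cons, hend, Bool.false_eq_true, if_false]
      rw [ih (s + 1) p]
      have : (s + 1) - (p + 1) = (s - (p + 1)) + 1 := by ring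
      simp [this]

-- Per-line equality of the two loop bodies, for nonnegative arr_size.
lemma pvLine (arr_size word_len : Int) (hsz : 0 ≤ arr_size) (line : String) (acc : Int) :
    (let wall : List Int :=
      [-1] ++ ((PySem.List.pyRange 0 arr_size 1).filter
                 (fun i => ((PySem.Str.pyGet? line i).getD ' ') = '0')) ++ [arr_size]
     (PySem.List.pyRange 1 (wall.length : Int) 1).foldl (fun possible_space i =>
      let space := PySem.List.pyGetD wall i 0 - (PySem.List.pyGetD wall (i - 1) 0 + 1)
      if space = word_len then possible_space + 1 else possible_space) acc)
    = (let st : Int × Int :=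
        (PySem.List.pyRange 0 arr_size 1).foldl (fun (st : Int × Int) i =>
          if ((PySem.Str.pyGet? line i).getD ' ') = '0' then
            (if st.2 = word_len then st.1 + 1 else st.1, 0)
          else
            (st.1, st.2 + 1)) (acc, 0)
       if st.2 = word_len then st.1 + 1 else st.1) := by
  have hn : arr_size = ((arr_size.toNat : Nat) : Int) := (Int.toNat_of_nonneg hsz).symm
  set n := arr_size.toNat with hn'
  have hrange : PySem.List.pyRange 0 arr_size 1 = pvL n 0 := by
    rw [hn, show ((n : Nat) : Int) = 0 + (n : Int) by ring, pvL_pyRange]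
  set pred : Int → Bool := fun i => decide (((PySem.Str.pyGet? line i).getD ' ') = '0') with hpred
  -- LHS: convert the indexed loop over wall to pvAPairs, then pvKey
  simp only []
  rw [hrange]
  have hwall : [-1] ++ ((pvL n 0).filter pred) ++ [arr_size]
      = (-1 : Int) :: (((pvL n 0).filter pred) ++ [arr_size]) := by simp
  rw [hwall]
  set l : List Int := ((pvL n 0).filter pred) ++ [arr_size] with hl
  have hlen : ((((-1 : Int) :: l).length : Nat) : Int) = 1 + (l.length : Int) := by
    simp; ring
  rw [hlen, PySem.List.pyRange_one, show ((1 : Int) + (l.length : Int) - 1) = (l.length : Int) by ring,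
    Int.toNat_natCast, List.foldl_map]
  rw [pvInnerA_nat word_len l (-1) acc]
  have hend : arr_size = (0 : Int) + (n : Int) := by rw [hn]; ring
  rw [hl, hend, pvKey word_len pred n 0 (-1) acc]
  simp only [hpred, decide_eq_true_eq, neg_add_cancel, sub_zero]
lemma pvFoldArr (arr : List String) (arr_size word_len : Int) (hsz : 0 ≤ arr_size) :
    find_possible_space arr arr_size word_len = find_possible_space_alt arr arr_size word_len := by
  unfold find_possible_space find_possible_space_alt
  congr 1
  funext acc line
  exact pvLine arr_size word_len hsz line acc

-- A's value when arr_size < 0: one phantom gap of length arr_size per line.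
lemma pvAneg (arr : List String) (arr_size word_len : Int) (h : arr_size < 0) :
    find_possible_space arr arr_size word_len
      = (if arr_size = word_len then (arr.length : Int) else 0) := by
  unfold find_possible_space
  have step : ∀ (acc : Int) (line : String),
      (let wall : List Int :=
        [-1] ++ ((PySem.List.pyRange 0 arr_size 1).filter
                   (fun i => ((PySem.Str.pyGet? line i).getD ' ') = '0')) ++ [arr_size]
       (PySem.List.pyRange 1 (wall.length : Int) 1).foldl (fun possible_space i =>
        let space := PySem.List.pyGetD wall i 0 - (PySem.List.pyGetD wall (i - 1) 0 + 1)
        if space = word_len then possible_space + 1 else possible_space) acc)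
      = (if arr_size = word_len then acc + 1 else acc) := by
    intro acc line
    rw [PySem.List.pyRange_one_eq_nil (by omega : arr_size ≤ 0)]
    simp only [List.filter_nil, List.append_nil, List.singleton_append]
    rw [show ((([-1, arr_size] : List Int).length : Nat) : Int) = 1 + 1 by simp,
      PySem.List.pyRange_one_singleton, List.foldl_cons, List.foldl_nil]
    norm_num [PySem.List.pyGetD_ofNat', PySem.List.pyGetD_zero_cons]
  induction arr with
  | nil => simp
  | cons line rest ih =>
    rw [List.foldl_cons, step 0 line]
    have shift : ∀ (l : List String) (a : Int),
        l.foldl (fun possible_space line =>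
          let wall : List Int :=
            [-1] ++ ((PySem.List.pyRange 0 arr_size 1).filter
                       (fun i => ((PySem.Str.pyGet? line i).getD ' ') = '0')) ++ [arr_size]
          (PySem.List.pyRange 1 (wall.length : Int) 1).foldl (fun possible_space i =>
            let space := PySem.List.pyGetD wall i 0 - (PySem.List.pyGetD wall (i - 1) 0 + 1)
            if space = word_len then possible_space + 1 else possible_space) possible_space) a
        = a + l.foldl (fun possible_space line =>
          let wall : List Int :=
            [-1] ++ ((PySem.List.pyRange 0 arr_size 1).filter
                       (fun i => ((PySem.Str.pyGet? line i).getD ' ') = '0')) ++ [arr_size]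
          (PySem.List.pyRange 1 (wall.length : Int) 1).foldl (fun possible_space i =>
            let space := PySem.List.pyGetD wall i 0 - (PySem.List.pyGetD wall (i - 1) 0 + 1)
            if space = word_len then possible_space + 1 else possible_space) possible_space) 0 := by
      intro l
      induction l with
      | nil => intro a; simp
      | cons y ys ihy =>
        intro a
        rw [List.foldl_cons, List.foldl_cons, step a y, step 0 y, ihy]
        conv_rhs => rw [ihy (if arr_size = word_len then 0 + 1 else 0)]
        split_ifs <;> ring
    rw [shift rest, ih]
    simp only [List.length_cons]
    split_ifs <;> push_cast <;> omega
-- B's value when arr_size < 0: one empty run per line.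
lemma pvBneg (arr : List String) (arr_size word_len : Int) (h : arr_size < 0) :
    find_possible_space_alt arr arr_size word_len
      = (if (0 : Int) = word_len then (arr.length : Int) else 0) := by
  unfold find_possible_space_alt
  have step : ∀ (acc : Int) (line : String),
      (let st : Int × Int :=
        (PySem.List.pyRange 0 arr_size 1).foldl (fun (st : Int × Int) i =>
          if ((PySem.Str.pyGet? line i).getD ' ') = '0' then
            (if st.2 = word_len then st.1 + 1 else st.1, 0)
          else
            (st.1, st.2 + 1)) (acc, 0)
       if st.2 = word_len then st.1 + 1 else st.1)
      = (if (0 : Int) = word_len then acc + 1 else acc) := by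
    intro acc line
    rw [PySem.List.pyRange_one_eq_nil (by omega : arr_size ≤ 0)]
    simp [eq_comm]
  induction arr with
  | nil => simp
  | cons line rest ih =>
    rw [List.foldl_cons, step 0 line]
    have shift : ∀ (l : List String) (a : Int),
        l.foldl (fun possible_space line =>
          let st : Int × Int :=
            (PySem.List.pyRange 0 arr_size 1).foldl (fun (st : Int × Int) i =>
              if ((PySem.Str.pyGet? line i).getD ' ') = '0' then
                (if st.2 = word_len then st.1 + 1 else st.1, 0)
              else
                (st.1, st.2 + 1)) (possible_space, 0)
          if st.2 = word_len then st.1 + 1 else st.1) a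
        = a + l.foldl (fun possible_space line =>
          let st : Int × Int :=
            (PySem.List.pyRange 0 arr_size 1).foldl (fun (st : Int × Int) i =>
              if ((PySem.Str.pyGet? line i).getD ' ') = '0' then
                (if st.2 = word_len then st.1 + 1 else st.1, 0)
              else
                (st.1, st.2 + 1)) (possible_space, 0)
          if st.2 = word_len then st.1 + 1 else st.1) 0 := by
      intro l
      induction l with
      | nil => intro a; simp
      | cons y ys ihy =>
        intro a
        rw [List.foldl_cons, List.foldl_cons, step a y, step 0 y, ihy]
        conv_rhs => rw [ihy (if (0 : Int) = word_len then 0 + 1 else 0)]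
        split_ifs <;> ring
    rw [shift rest, ih]
    simp only [List.length_cons]
    split_ifs <;> push_cast <;> omega

-- ===== VERDICT (by name: the statement is the Claim_ definition above) =====
theorem find_possible_space_spec : Claim_unchanged_find_possible_space := by
  intro arr arr_size word_len _hdom _hpre
  intro hnd
  by_cases hsz : 0 ≤ arr_size
  · exact pvFoldArr arr arr_size word_len hsz
  · push_neg at hsz
    rw [pvAneg arr arr_size word_len hsz, pvBneg arr arr_size word_len hsz]
    unfold D_find_possible_space at hnd
    push_neg at hnd
    rcases List.eq_nil_or_concat arr with hnil | ⟨_, _, rfl⟩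
    · simp [hnil]
    · have := hnd (by simp) hsz
      rw [if_neg (fun hw => this.2 hw.symm), if_neg (fun hw => this.1 hw.symm)]

theorem find_possible_space_changed : Claim_changed_find_possible_space := by
  unfold Claim_changed_find_possible_space; decide

theorem find_possible_space_tight : Claim_exact_find_possible_space := by
  intro arr arr_size word_len _hdom _hpre hd
  obtain ⟨hne, hsz, hw⟩ := hd
  rw [pvAneg arr arr_size word_len hsz, pvBneg arr arr_size word_len hsz]
  have hlen : (0 : Int) < arr.length := by
    cases arr with
    | nil => exact absurd rfl hne
    | cons h t => rw [List.length_cons]; push_cast; omega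
  rcases hw with rfl | rfl
  · rw [if_neg (by omega), if_pos rfl]; omega
  · rw [if_pos rfl, if_neg (by omega)]; omega
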